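-- pv_equiv track=rewrite | github.com/kiselev1189/SberBDrQAReader | scripts/reader/preprocess.py | find_answer_csv
-- ===== SOURCE A (Python) =====
-- def find_answer_csv(offsets, document, tokens):
--     """Match token offsets with the char begin/end offsets of the answer."""
--     while tokens[-1] == '.' or tokens[-1] == '?':
--         tokens = tokens[:-1]
--     while tokens[0] == '.' or tokens[0] == '?':
--         tokens = tokens[1:]
--     for i in range(len(document)):
--         # if i + len(tokens) > len(document):
--         # check
--         if i + len(tokens) >= len(document):
--             break
--         success = True
--         for pos, token in enumerate(tokens):
--             if document[i + pos].lower() != token: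
--                 success = False
--                 break
--         if success:
--             return i, i + len(tokens)
--
--     for i in range(len(document)):
--         success = True
--         # if i + len(tokens) > len(document):
--         if i + len(tokens) >= len(document):
--             break
--         for pos, token in enumerate(tokens):
--             if token not in document[i + pos].lower():
--                 success = False
--                 break
--         if success:
--             return i, i + len(tokens)
-- ===== SOURCE B (Python) =====
-- def find_answer_csv(offsets, document, tokens):
--     """Match token offsets with the char begin/end offsets of the answer."""
--     hi = len(tokens)
--     while hi > 0 and tokens[hi - 1] in ('.', '?'):
--         hi -= 1
--     lo = 0
--     while lo < hi and tokens[lo] in ('.', '?'):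
--         lo += 1
--     toks = tokens[lo:hi]
--     m = len(toks)
--     low = [w.lower() for w in document]
--     limit = len(document) - m + 1
--     # hash index built once: occurrence positions of every lowered document word
--     occ = {}
--     for i, w in enumerate(low):
--         occ.setdefault(w, []).append(i)
--     # exact pass: only positions where the head token occurs are candidates
--     head, rest = toks[0], toks[1:]
--     for i in occ.get(head, ()):
--         if i < limit and low[i + 1:i + m] == rest:
--             return i, i + m
--     # fallback substring pass (containment cannot be indexed; kept as a scan)
--     for i in range(limit):
--         if all(t in w for t, w in zip(toks, low[i:i + m])):
--             return i, i + m
--     return None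
-- ===== Notes on version B (the rewrite author's own statement) =====
-- stated objective: alternative
-- what changed: B strips the '.'/'?' edge tokens by index arithmetic, lowers the document once, and replaces A's sliding-window exact pass by a hash index (lowered word -> occurrence positions, built in one pass) so only windows that start with the head token are verified; the substring fallback stays a scan (containment cannot be indexed) written as zip/all, and B uses the intended window bound len(document)-m+1 where A's loops break one window early.
-- intended difference: On inputs where the stripped token sequence matches the document only at the last possible window (start len(document)-m), A's loops break one window early (its source even carries the commented-out correct bound) and return None or an earlier weak substring match, while B returns that final match, which is the intended value. — e.g. on find_answer_csv([], ["a", "b"], ["b"]): A returns none, B returns some (1, 2)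
import Mathlib
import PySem

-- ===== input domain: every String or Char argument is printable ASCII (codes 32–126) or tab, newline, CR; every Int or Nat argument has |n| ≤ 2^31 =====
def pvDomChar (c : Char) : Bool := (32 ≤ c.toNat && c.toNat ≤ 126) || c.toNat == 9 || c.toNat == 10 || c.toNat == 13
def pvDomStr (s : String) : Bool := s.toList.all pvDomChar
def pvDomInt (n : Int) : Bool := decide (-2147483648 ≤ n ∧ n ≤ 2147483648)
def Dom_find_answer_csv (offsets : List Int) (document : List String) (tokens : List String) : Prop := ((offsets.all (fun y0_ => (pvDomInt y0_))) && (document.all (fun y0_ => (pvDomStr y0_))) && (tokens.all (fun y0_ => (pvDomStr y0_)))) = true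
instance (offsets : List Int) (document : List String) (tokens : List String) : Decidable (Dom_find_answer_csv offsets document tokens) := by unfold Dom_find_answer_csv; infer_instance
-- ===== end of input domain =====

-- B replaces A's sliding-window exact pass by a hash index (word -> occurrence positions,
-- built once) so only windows starting with the head token are examined; the substring
-- fallback pass stays a scan; B uses the intended window bound len(document)-m+1 where
-- A's loops break one window early (see D_ below).
-- ===== PORT A =====
-- while tokens[-1] == '.' or tokens[-1] == '?': tokens = tokens[:-1]
-- (tokens[-1] on an empty list raises IndexError: those inputs are outside Pre_;
--  the fuel arguments below only make the loops structurally total: with the fuel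
--  each entry point supplies, the fuel-0 branch is never the one that decides the value)
def pvStripTailGo : Nat → List String → List String
  | 0, ts => ts
  | fuel + 1, ts =>
    match PySem.List.pyGet? ts (-1) with
    | some t => if t = "." ∨ t = "?" then pvStripTailGo fuel (PySem.List.slice ts none (some (-1))) else ts
    | none => ts

def pvStripTail (ts : List String) : List String := pvStripTailGo ts.length ts

-- while tokens[0] == '.' or tokens[0] == '?': tokens = tokens[1:]
def pvStripHeadGo : Nat → List String → List String
  | 0, ts => ts
  | fuel + 1, ts =>
    match PySem.List.pyGet? ts 0 with
    | some t => if t = "." ∨ t = "?" then pvStripHeadGo fuel (PySem.List.slice ts (some 1) none) else ts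
    | none => ts

def pvStripHead (ts : List String) : List String := pvStripHeadGo ts.length ts

-- inner 'for pos, token in enumerate(tokens)' loop of pass 1 (success flag + break);
-- document[i + pos] is always in range under the loop's break guard (pyGetD default unreachable)
def pvInner1 (document : List String) (i : Nat) : List String → Nat → Bool
  | [], _ => true
  | tok :: rest, pos =>
    if PySem.Str.lower (PySem.List.pyGetD document ((i : Int) + (pos : Int)) "") ≠ tok then false
    else pvInner1 document i rest (pos + 1)

-- first 'for i in range(len(document))' loop with its break
def pvLoop1 (document toks : List String) : Nat → Nat → Option (Int × Int)
  | 0, _ => none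
  | fuel + 1, i =>
    if i < document.length then
      if document.length ≤ i + toks.length then none
      else if pvInner1 document i toks 0 then some ((i : Int), (i : Int) + (toks.length : Int))
      else pvLoop1 document toks fuel (i + 1)
    else none

-- inner loop of pass 2: 'if token not in document[i + pos].lower(): …'
def pvInner2 (document : List String) (i : Nat) : List String → Nat → Bool
  | [], _ => true
  | tok :: rest, pos =>
    if PySem.Str.isIn tok (PySem.Str.lower (PySem.List.pyGetD document ((i : Int) + (pos : Int)) "")) = false then false
    else pvInner2 document i rest (pos + 1)

-- second 'for i in range(len(document))' loop with its break
def pvLoop2 (document toks : List String) : Nat → Nat → Option (Int × Int)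
  | 0, _ => none
  | fuel + 1, i =>
    if i < document.length then
      if document.length ≤ i + toks.length then none
      else if pvInner2 document i toks 0 then some ((i : Int), (i : Int) + (toks.length : Int))
      else pvLoop2 document toks fuel (i + 1)
    else none

def find_answer_csv (offsets : List Int) (document : List String) (tokens : List String) : Option (Int × Int) :=
  match pvLoop1 document (pvStripHead (pvStripTail tokens)) (document.length + 1) 0 with
  | some r => some r
  | none => pvLoop2 document (pvStripHead (pvStripTail tokens)) (document.length + 1) 0

-- ===== PORT B =====
-- 'tokens[hi - 1] in ('.', '?')'
def altPunct (t : String) : Bool := [".", "?"].contains t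

-- while hi > 0 and tokens[hi - 1] in ('.', '?'): hi -= 1   (structural on hi)
def altHi (tokens : List String) : Nat → Nat
  | 0 => 0
  | hi + 1 =>
    if altPunct (PySem.List.pyGetD tokens (((hi + 1 : Nat) : Int) - 1) "") then altHi tokens hi
    else hi + 1

-- while lo < hi and tokens[lo] in ('.', '?'): lo += 1   (fuel = hi - lo iterations remain)
def altLoGo (tokens : List String) (hi : Nat) : Nat → Nat → Nat
  | 0, lo => lo
  | fuel + 1, lo =>
    if lo < hi ∧ altPunct (PySem.List.pyGetD tokens (lo : Int) "") then altLoGo tokens hi fuel (lo + 1)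
    else lo

def altLo (tokens : List String) (hi lo : Nat) : Nat := altLoGo tokens hi (hi - lo) lo

-- occ = {}; for i, w in enumerate(low): occ.setdefault(w, []).append(i)
def altOcc (low : List String) : PySem.Dict String (List Int) :=
  (PySem.List.enumerate low).foldl (fun occ iw => occ.modify iw.2 [] (fun l => l ++ [iw.1])) PySem.Dict.empty

-- for i in occ.get(head, ()): if i < limit and low[i+1:i+m] == rest: return i, i+m
def altScan1 (low rest : List String) (m : Nat) (limit : Int) : List Int → Option (Int × Int)
  | [] => none
  | i :: is =>
    if i < limit ∧ PySem.List.slice low (some (i + 1)) (some (i + (m : Int))) = rest then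
      some (i, i + (m : Int))
    else altScan1 low rest m limit is

-- for i in range(limit): if all(t in w for t, w in zip(toks, low[i:i+m])): return i, i+m
def altScan2 (low toks : List String) (m : Nat) (limit : Int) : Nat → Nat → Option (Int × Int)
  | 0, _ => none
  | fuel + 1, i =>
    if (i : Int) < limit then
      if (toks.zip (PySem.List.slice low (some (i : Int)) (some ((i : Int) + (m : Int))))).all
          (fun tw => PySem.Str.isIn tw.1 tw.2) then some ((i : Int), (i : Int) + (m : Int))
      else altScan2 low toks m limit fuel (i + 1)
    else none

-- body after the strip: low = [w.lower() for w in document], the occurrence index,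
-- head, rest = toks[0], toks[1:] (toks[0] raises in Python only when toks is empty, i.e. outside Pre_),
-- the indexed exact pass, then the fallback scan
def altMain (document toks : List String) : Option (Int × Int) :=
  match altScan1 (document.map PySem.Str.lower) (PySem.List.slice toks (some 1) none) toks.length
      ((document.length : Int) - (toks.length : Int) + 1)
      ((altOcc (document.map PySem.Str.lower)).getD (PySem.List.pyGetD toks 0 "") []) with
  | some r => some r
  | none =>
    altScan2 (document.map PySem.Str.lower) toks toks.length
      ((document.length : Int) - (toks.length : Int) + 1) (document.length + 1) 0

def find_answer_csv_alt (offsets : List Int) (document : List String) (tokens : List String) : Option (Int × Int) :=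
  altMain document
    (PySem.List.slice tokens (some ((altLo tokens (altHi tokens tokens.length) 0 : Nat) : Int))
      (some ((altHi tokens tokens.length : Nat) : Int)))

-- ===== PRECONDITION & SPEC =====
def dPunct (t : String) : Bool := t == "." || t == "?"

-- the token list after stripping leading/trailing '.'/'?'
def dStrip (tokens : List String) : List String :=
  ((tokens.reverse.dropWhile dPunct).reverse).dropWhile dPunct

-- A raises IndexError when tokens is empty or consists only of '.'/'?' (the strip loops
-- run the list empty and index it); Pre_ excludes exactly those inputs.
def Pre_find_answer_csv (offsets : List Int) (document : List String) (tokens : List String) : Prop :=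
  ∃ t ∈ tokens, dPunct t = false
instance (offsets : List Int) (document : List String) (tokens : List String) : Decidable (Pre_find_answer_csv offsets document tokens) := by unfold Pre_find_answer_csv; infer_instance

def pvWitness_find_answer_csv : List Int × List String × List String := ([], ["a"], ["a"])

-- On inputs where the stripped tokens match the document only at the last possible window
-- (start len(document)-m), A's loops break one window early (note the commented-out correct
-- bound in A's source) and return None or an earlier weak substring match, while B returns
-- that final match, which is the intended value.
-- Bool helpers for D_ (they only inspect the input): every stripped token a substring of the
-- paired lowered word, and 'no window starting before position K matches', tested over the
-- shared suffix list low.tails so that deciding D_ stays cheap on large inputs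
def dSubB : List String → List String → Bool
  | tok :: t, w :: s => PySem.Str.isIn tok w && dSubB t s
  | _, _ => true

def dNoExactBefore (t low : List String) (K : Nat) : Bool :=
  (low.tails.take K).all fun s => !(t.isPrefixOf s)

def dNoSubBefore (t low : List String) (K : Nat) : Bool :=
  (low.tails.take K).all fun s => !(dSubB t s)

def D_find_answer_csv (offsets : List Int) (document : List String) (tokens : List String) : Prop :=
  (dStrip tokens).length ≤ document.length ∧
    (((dStrip tokens).isPrefixOf
          ((document.map PySem.Str.lower).drop (document.length - (dStrip tokens).length)) = true ∧
        dNoExactBefore (dStrip tokens) (document.map PySem.Str.lower)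
          (document.length - (dStrip tokens).length) = true) ∨
     (dNoExactBefore (dStrip tokens) (document.map PySem.Str.lower)
          (document.length - (dStrip tokens).length + 1) = true ∧
        dSubB (dStrip tokens)
          ((document.map PySem.Str.lower).drop (document.length - (dStrip tokens).length)) = true ∧
        dNoSubBefore (dStrip tokens) (document.map PySem.Str.lower)
          (document.length - (dStrip tokens).length) = true))
instance (offsets : List Int) (document : List String) (tokens : List String) : Decidable (D_find_answer_csv offsets document tokens) := by unfold D_find_answer_csv; infer_instance

def Spec_find_answer_csv (offsets : List Int) (document : List String) (tokens : List String) (out : Option (Int × Int)) : Prop := ¬ D_find_answer_csv offsets document tokens → out = find_answer_csv_alt offsets document tokens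
instance (offsets : List Int) (document : List String) (tokens : List String) (out : Option (Int × Int)) : Decidable (Spec_find_answer_csv offsets document tokens out) := by unfold Spec_find_answer_csv; infer_instance

def pvDiffWitness_find_answer_csv : List Int × List String × List String := ([], ["a", "b"], ["b"])
def pvDiffWitnessOut_find_answer_csv : (Option (Int × Int)) × (Option (Int × Int)) := (none, some (1, 2))

-- ===== CLAIM (what is proved, stated in full; the proofs are below) =====
def Claim_unchanged_find_answer_csv : Prop := ∀ (offsets : List Int) (document : List String) (tokens : List String), Dom_find_answer_csv offsets document tokens → Pre_find_answer_csv offsets document tokens → Spec_find_answer_csv offsets document tokens (find_answer_csv offsets document tokens)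
def Claim_changed_find_answer_csv : Prop := Dom_find_answer_csv (pvDiffWitness_find_answer_csv.1) (pvDiffWitness_find_answer_csv.2.1) (pvDiffWitness_find_answer_csv.2.2) ∧ Pre_find_answer_csv (pvDiffWitness_find_answer_csv.1) (pvDiffWitness_find_answer_csv.2.1) (pvDiffWitness_find_answer_csv.2.2) ∧ D_find_answer_csv (pvDiffWitness_find_answer_csv.1) (pvDiffWitness_find_answer_csv.2.1) (pvDiffWitness_find_answer_csv.2.2) ∧ find_answer_csv (pvDiffWitness_find_answer_csv.1) (pvDiffWitness_find_answer_csv.2.1) (pvDiffWitness_find_answer_csv.2.2) = pvDiffWitnessOut_find_answer_csv.1 ∧ find_answer_csv_alt (pvDiffWitness_find_answer_csv.1) (pvDiffWitness_find_answer_csv.2.1) (pvDiffWitness_find_answer_csv.2.2) = pvDiffWitnessOut_find_answer_csv.2 ∧ pvDiffWitnessOut_find_answer_csv.1 ≠ pvDiffWitnessOut_find_answer_csv.2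
def Claim_exact_find_answer_csv : Prop := ∀ (offsets : List Int) (document : List String) (tokens : List String), Dom_find_answer_csv offsets document tokens → Pre_find_answer_csv offsets document tokens → D_find_answer_csv offsets document tokens → find_answer_csv offsets document tokens ≠ find_answer_csv_alt offsets document tokens

-- ===== LEMMAS AND PROOFS =====

-- proof-side characterisations: the stripped tokens exactly match / are substrings of the
-- lowered document words starting at position j
def dExactAt (document toks : List String) (j : Nat) : Bool :=
  (((document.map PySem.Str.lower).drop j).take toks.length) == toks

def dSubAt (document toks : List String) (j : Nat) : Bool :=
  (toks.zip (((document.map PySem.Str.lower).drop j).take toks.length)).all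
    fun tw => PySem.Str.isIn tw.1 tw.2

theorem dPunct_iff (t : String) : dPunct t = true ↔ (t = "." ∨ t = "?") := by
  simp [dPunct]

theorem stripTailGo_eq (fuel : Nat) (ts : List String) (h : ts.length ≤ fuel) :
    pvStripTailGo fuel ts = (ts.reverse.dropWhile dPunct).reverse := by
  induction fuel generalizing ts with
  | zero =>
    have : ts = [] := List.eq_nil_of_length_eq_zero (by omega)
    subst this; simp [pvStripTailGo]
  | succ fuel ih =>
    cases ts using List.reverseRecOn with
    | nil => simp [pvStripTailGo, PySem.List.pyGet?, PySem.List.pyIdx?]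
    | append_singleton as a =>
      have hg : PySem.List.pyGet? (as ++ [a]) (-1) = some a := by
        simp [PySem.List.pyGet?, PySem.List.pyIdx?]
      rw [pvStripTailGo, hg]
      simp only [PySem.List.slice_to_neg_one, List.dropLast_concat, List.reverse_append,
        List.reverse_cons, List.reverse_nil, List.nil_append, List.cons_append,
        List.dropWhile_cons]
      by_cases hp : dPunct a = true
      · have : a = "." ∨ a = "?" := (dPunct_iff a).1 hp
        rw [if_pos this, ih as (by simpa using Nat.le_of_succ_le_succ (by simpa using h)), hp]
        simp
      · have : ¬ (a = "." ∨ a = "?") := fun hc => hp ((dPunct_iff a).2 hc)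
        rw [if_neg this]
        simp [hp]

theorem stripHeadGo_eq (fuel : Nat) (ts : List String) (h : ts.length ≤ fuel) :
    pvStripHeadGo fuel ts = ts.dropWhile dPunct := by
  induction fuel generalizing ts with
  | zero =>
    have : ts = [] := List.eq_nil_of_length_eq_zero (by omega)
    subst this; simp [pvStripHeadGo]
  | succ fuel ih =>
    cases ts with
    | nil => simp [pvStripHeadGo, PySem.List.pyGet?, PySem.List.pyIdx?]
    | cons a l =>
      have hg : PySem.List.pyGet? (a :: l) 0 = some a := by
        simp [PySem.List.pyGet?, PySem.List.pyIdx?]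
      rw [pvStripHeadGo, hg, PySem.List.slice_from_one]
      simp only [List.tail_cons, List.dropWhile_cons]
      by_cases hp : dPunct a = true
      · have : a = "." ∨ a = "?" := (dPunct_iff a).1 hp
        rw [if_pos this, ih l (by simpa using Nat.le_of_succ_le_succ (by simpa using h)), hp]
        simp
      · have : ¬ (a = "." ∨ a = "?") := fun hc => hp ((dPunct_iff a).2 hc)
        rw [if_neg this]
        simp [hp]

theorem stripA_eq (ts : List String) : pvStripHead (pvStripTail ts) = dStrip ts := by
  rw [pvStripTail, stripTailGo_eq ts.length ts le_rfl, pvStripHead,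
    stripHeadGo_eq _ _ le_rfl, dStrip]

theorem altPunct_eq (t : String) : altPunct t = dPunct t := by
  simp [altPunct, dPunct]; rfl

theorem altHi_eq (ts : List String) (hi : Nat) (h : hi ≤ ts.length) :
    altHi ts hi = ((ts.take hi).reverse.dropWhile dPunct).length := by
  induction hi with
  | zero => simp [altHi]
  | succ hi ih =>
    have hlt : hi < ts.length := by omega
    have hcast : (((hi + 1 : Nat) : Int) - 1) = ((hi : Nat) : Int) := by push_cast; ring
    have hget : PySem.List.pyGetD ts (((hi + 1 : Nat) : Int) - 1) "" = ts[hi] := by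
      rw [hcast, PySem.List.pyGetD_natCast, List.getD_eq_getElem?_getD, List.getElem?_eq_getElem hlt]
      rfl
    have htk : ts.take (hi + 1) = ts.take hi ++ [ts[hi]] := by
      rw [List.take_add_one, List.getElem?_eq_getElem hlt]; rfl
    rw [altHi, hget, htk, altPunct_eq]
    simp only [List.reverse_append, List.reverse_cons, List.reverse_nil, List.nil_append,
      List.cons_append, List.dropWhile_cons]
    by_cases hp : dPunct ts[hi] = true
    · rw [hp, if_pos rfl, ih (by omega)]
      simp
    · simp only [hp]
      simp [List.length_reverse, List.length_take]
      omega

theorem altLoGo_drop (ts : List String) (hi : Nat) (h : hi ≤ ts.length) (fuel lo : Nat) (hf : hi ≤ fuel + lo) :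
    lo ≤ altLoGo ts hi fuel lo ∧
      ((ts.take hi).drop (altLoGo ts hi fuel lo)) = ((ts.take hi).drop lo).dropWhile dPunct := by
  induction fuel generalizing lo with
  | zero =>
    have : (ts.take hi).drop lo = [] := by
      rw [List.drop_eq_nil_iff]; simp; omega
    simp [altLoGo, this]
  | succ fuel ih =>
    rw [altLoGo]
    by_cases hlo : lo < hi
    · have hlt : lo < ts.length := by omega
      have hget : PySem.List.pyGetD ts ((lo : Nat) : Int) "" = ts[lo] := by
        rw [PySem.List.pyGetD_natCast, List.getD_eq_getElem?_getD, List.getElem?_eq_getElem hlt]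
        rfl
      have hdrop : (ts.take hi).drop lo = ts[lo] :: (ts.take hi).drop (lo + 1) := by
        rw [List.drop_eq_getElem_cons (by simp; omega)]
        simp [List.getElem_take]
      by_cases hp : dPunct ts[lo] = true
      · rw [if_pos ⟨hlo, by rw [hget, altPunct_eq]; exact hp⟩]
        obtain ⟨h1, h2⟩ := ih (lo + 1) (by omega)
        refine ⟨by omega, ?_⟩
        rw [h2, hdrop, List.dropWhile_cons, hp]
        simp
      · have hp' : dPunct ts[lo] = false := by simpa using hp
        rw [if_neg (by rw [hget, altPunct_eq, hp']; exact fun hc => by simpa using hc.2)]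
        refine ⟨le_refl _, ?_⟩
        rw [hdrop, List.dropWhile_cons, hp']
        simp
    · rw [if_neg (fun hc => hlo hc.1)]
      have hnil : (ts.take hi).drop lo = [] := by rw [List.drop_eq_nil_iff]; simp; omega
      simp [hnil]

theorem stripB_eq (ts : List String) :
    PySem.List.slice ts (some ((altLo ts (altHi ts ts.length) 0 : Nat) : Int))
      (some ((altHi ts ts.length : Nat) : Int)) = dStrip ts := by
  set hi := altHi ts ts.length with hhi
  have hhe : hi = ((ts.take ts.length).reverse.dropWhile dPunct).length := altHi_eq ts ts.length le_rfl
  have hhe' : hi = (ts.reverse.dropWhile dPunct).length := by simpa using hhe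
  have hhile : hi ≤ ts.length := by
    rw [hhe']
    calc (ts.reverse.dropWhile dPunct).length ≤ ts.reverse.length := List.length_dropWhile_le _ _
    _ = ts.length := by simp
  have hpref : (ts.reverse.dropWhile dPunct).reverse <+: ts := by
    have h1 : ts.reverse.dropWhile dPunct <:+ ts.reverse := List.dropWhile_suffix _
    have := h1.reverse
    simpa using this
  have htake : ts.take hi = (ts.reverse.dropWhile dPunct).reverse := by
    have he := List.prefix_iff_eq_take.mp hpref
    rw [hhe']
    conv_lhs => rw [show (ts.reverse.dropWhile dPunct).length = ((ts.reverse.dropWhile dPunct).reverse).length by simp]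
    exact he.symm
  obtain ⟨h1, h2⟩ := altLoGo_drop ts hi hhile (hi - 0) 0 (by omega)
  rw [PySem.List.slice_natCast]
  have hcomm : (ts.drop (altLo ts hi 0)).take (hi - altLo ts hi 0) = (ts.take hi).drop (altLo ts hi 0) := by
    exact List.extract_eq_drop_take'
  rw [hcomm]
  rw [show altLo ts hi 0 = altLoGo ts hi (hi - 0) 0 from rfl, h2]
  simp only [List.drop_zero, htake, dStrip]

theorem dStrip_ne_nil (tokens : List String) (h : ∃ t ∈ tokens, dPunct t = false) :
    dStrip tokens ≠ [] := by
  obtain ⟨t, ht, hp⟩ := h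
  have hmem : t ∈ tokens.reverse := by simpa using ht
  have hsplit : tokens.reverse.takeWhile dPunct ++ tokens.reverse.dropWhile dPunct = tokens.reverse :=
    List.takeWhile_append_dropWhile
  have h1 : t ∈ tokens.reverse.dropWhile dPunct := by
    rcases List.mem_append.mp (by rw [hsplit]; exact hmem) with hc | hc
    · exact absurd (List.mem_takeWhile_imp hc) (by simp [hp])
    · exact hc
  intro hc
  rw [dStrip, List.dropWhile_eq_nil_iff] at hc
  exact absurd (hc t (by simpa using h1)) (by simp [hp])

theorem low_drop_cons (document : List String) (k : Nat) (hk : k < document.length) :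
    (document.map PySem.Str.lower).drop k =
      PySem.Str.lower document[k] :: (document.map PySem.Str.lower).drop (k + 1) := by
  rw [List.drop_eq_getElem_cons (by simpa using hk)]
  simp

theorem getD_doc (document : List String) (i pos : Nat) (hk : i + pos < document.length) :
    PySem.List.pyGetD document ((i : Int) + (pos : Int)) "" = document[i + pos] := by
  have : (i : Int) + (pos : Int) = ((i + pos : Nat) : Int) := by push_cast; ring
  rw [this, PySem.List.pyGetD_natCast, List.getD_eq_getElem?_getD, List.getElem?_eq_getElem hk]
  rfl

theorem inner1_iff (document : List String) (i : Nat) (ts : List String) (pos : Nat)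
    (h : i + pos + ts.length ≤ document.length) :
    (pvInner1 document i ts pos = true ↔
      (((document.map PySem.Str.lower).drop (i + pos)).take ts.length) = ts) := by
  induction ts generalizing pos with
  | nil => simp [pvInner1]
  | cons tok rest ih =>
    have hk : i + pos < document.length := by simp at h; omega
    have hih := ih (pos + 1) (by simp at h ⊢; omega)
    rw [show i + (pos + 1) = i + pos + 1 by omega] at hih
    rw [pvInner1, getD_doc document i pos hk, low_drop_cons document (i + pos) hk]
    simp only [List.length_cons, List.take_succ_cons, List.cons_eq_cons]
    split_ifs with hne
    · simp only [Bool.false_eq_true, false_iff]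
      exact fun hc => hne hc.1
    · push_neg at hne
      rw [hih]
      simp [hne]

theorem inner2_eq (document : List String) (i : Nat) (ts : List String) (pos : Nat)
    (h : i + pos + ts.length ≤ document.length) :
    pvInner2 document i ts pos =
      ((ts.zip (((document.map PySem.Str.lower).drop (i + pos)).take ts.length)).all
        fun tw => PySem.Str.isIn tw.1 tw.2) := by
  induction ts generalizing pos with
  | nil => simp [pvInner2]
  | cons tok rest ih =>
    have hk : i + pos < document.length := by simp at h; omega
    have hih := ih (pos + 1) (by simp at h ⊢; omega)
    rw [show i + (pos + 1) = i + pos + 1 by omega] at hih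
    rw [pvInner2, getD_doc document i pos hk, low_drop_cons document (i + pos) hk]
    simp only [List.length_cons, List.take_succ_cons, List.zip_cons_cons, List.all_cons]
    split_ifs with hne
    · have hne' : PySem.Chars.isIn tok.toList (PySem.Chars.lower document[i + pos].toList) = false := by
        simpa using hne
      simp [hne']
    · simp only [Bool.not_eq_false] at hne
      rw [hih, hne]
      simp

theorem inner1_eq_dExactAt (document toks : List String) (i : Nat)
    (h : i + toks.length ≤ document.length) :
    pvInner1 document i toks 0 = dExactAt document toks i := by
  have h1 := inner1_iff document i toks 0 (by omega)
  rw [show i + 0 = i by omega] at h1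
  by_cases hb : pvInner1 document i toks 0 = true
  · rw [hb]
    have hx := h1.mp hb
    have hd : dExactAt document toks i = true := by simp [dExactAt, hx]
    exact hd.symm
  · have hb' : pvInner1 document i toks 0 = false := by simpa using hb
    rw [hb']
    have : ¬ ((((document.map PySem.Str.lower).drop i).take toks.length) = toks) :=
      fun hc => hb (h1.mpr hc)
    simp [dExactAt, this]

theorem inner2_eq_dSubAt (document toks : List String) (i : Nat)
    (h : i + toks.length ≤ document.length) :
    pvInner2 document i toks 0 = dSubAt document toks i := by
  have h1 := inner2_eq document i toks 0 (by omega)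
  rw [show i + 0 = i by omega] at h1
  rw [h1, dSubAt]

theorem loopA1_none (document toks : List String) (fuel i : Nat)
    (h : ∀ j, i ≤ j → j + toks.length < document.length → ¬ dExactAt document toks j) :
    pvLoop1 document toks fuel i = none := by
  induction fuel generalizing i with
  | zero => rfl
  | succ fuel ih =>
    rw [pvLoop1]
    split_ifs with h1 h2 h3
    · rfl
    · have := h i le_rfl (by omega)
      rw [inner1_eq_dExactAt document toks i (by omega)] at h3
      exact absurd h3 this
    · exact ih (i + 1) (fun j hj hjm => h j (by omega) hjm)
    · rfl

theorem loopA1_some (document toks : List String) (fuel i j : Nat) (hfuel : document.length ≤ fuel + i)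
    (hij : i ≤ j) (hj : j + toks.length < document.length) (hE : dExactAt document toks j)
    (hmin : ∀ k, i ≤ k → k < j → ¬ dExactAt document toks k) :
    pvLoop1 document toks fuel i = some ((j : Int), (j : Int) + (toks.length : Int)) := by
  induction fuel generalizing i with
  | zero => omega
  | succ fuel ih =>
    rw [pvLoop1]
    rw [if_pos (by omega), if_neg (by omega)]
    rcases Nat.eq_or_lt_of_le hij with rfl | hlt
    · rw [if_pos (by rw [inner1_eq_dExactAt document toks i (by omega)]; exact hE)]
    · rw [if_neg (by
        rw [inner1_eq_dExactAt document toks i (by omega)]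
        simpa using hmin i le_rfl hlt)]
      exact ih (i + 1) (by omega) (by omega) (fun k hk hkj => hmin k (by omega) hkj)

theorem loopA2_none (document toks : List String) (fuel i : Nat)
    (h : ∀ j, i ≤ j → j + toks.length < document.length → ¬ dSubAt document toks j) :
    pvLoop2 document toks fuel i = none := by
  induction fuel generalizing i with
  | zero => rfl
  | succ fuel ih =>
    rw [pvLoop2]
    split_ifs with h1 h2 h3
    · rfl
    · have := h i le_rfl (by omega)
      rw [inner2_eq_dSubAt document toks i (by omega)] at h3
      exact absurd h3 this
    · exact ih (i + 1) (fun j hj hjm => h j (by omega) hjm)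
    · rfl

theorem loopA2_some (document toks : List String) (fuel i j : Nat) (hfuel : document.length ≤ fuel + i)
    (hij : i ≤ j) (hj : j + toks.length < document.length) (hS : dSubAt document toks j)
    (hmin : ∀ k, i ≤ k → k < j → ¬ dSubAt document toks k) :
    pvLoop2 document toks fuel i = some ((j : Int), (j : Int) + (toks.length : Int)) := by
  induction fuel generalizing i with
  | zero => omega
  | succ fuel ih =>
    rw [pvLoop2]
    rw [if_pos (by omega), if_neg (by omega)]
    rcases Nat.eq_or_lt_of_le hij with rfl | hlt
    · rw [if_pos (by rw [inner2_eq_dSubAt document toks i (by omega)]; exact hS)]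
    · rw [if_neg (by
        rw [inner2_eq_dSubAt document toks i (by omega)]
        simpa using hmin i le_rfl hlt)]
      exact ih (i + 1) (by omega) (by omega) (fun k hk hkj => hmin k (by omega) hkj)

theorem loopA2_shape (document toks : List String) (fuel i : Nat) (r : Int × Int)
    (h : pvLoop2 document toks fuel i = some r) :
    ∃ j : Nat, i ≤ j ∧ j + toks.length < document.length ∧
      r = ((j : Int), (j : Int) + (toks.length : Int)) := by
  induction fuel generalizing i with
  | zero => exact absurd h (by simp [pvLoop2])
  | succ fuel ih =>
    rw [pvLoop2] at h
    split_ifs at h with h1 h2 h3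
    · exact ⟨i, le_rfl, by omega, by simpa using h.symm⟩
    · obtain ⟨j, hj1, hj2, hj3⟩ := ih (i + 1) h
      exact ⟨j, by omega, hj2, hj3⟩

theorem getD_low (low : List String) (i : Nat) (hk : i < low.length) :
    PySem.List.pyGetD low ((i : Nat) : Int) "" = low[i] := by
  rw [PySem.List.pyGetD_natCast, List.getD_eq_getElem?_getD, List.getElem?_eq_getElem hk]
  rfl

theorem slice_window (low : List String) (i m : Nat) (hm : 1 ≤ m) :
    PySem.List.slice low (some ((i : Int) + 1)) (some ((i : Int) + (m : Int))) =
      (low.drop (i + 1)).take (m - 1) := by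
  have h1 : (i : Int) + 1 = ((i + 1 : Nat) : Int) := by push_cast; ring
  have h2 : (i : Int) + (m : Int) = ((i + m : Nat) : Int) := by push_cast; ring
  rw [h1, h2, PySem.List.slice_natCast]
  congr 1
  omega

theorem testB1_iff (document toks : List String) (head : String) (rest : List String)
    (hcons : toks = head :: rest) (i : Nat) (hi : i + toks.length ≤ document.length) :
    ((PySem.List.pyGetD (document.map PySem.Str.lower) (i : Int) "" = head ∧
        PySem.List.slice (document.map PySem.Str.lower) (some ((i : Int) + 1))
          (some ((i : Int) + (toks.length : Int))) = rest) ↔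
      dExactAt document toks i = true) := by
  have hm : 1 ≤ toks.length := by rw [hcons]; simp
  have hk : i < document.length := by omega
  have hlen : i < (document.map PySem.Str.lower).length := by simpa using hk
  rw [getD_low _ i hlen, slice_window _ i toks.length hm]
  rw [dExactAt, beq_iff_eq]
  conv_rhs => rw [low_drop_cons document i hk, hcons]
  rw [show toks.length = rest.length + 1 by rw [hcons]; simp]
  simp only [List.length_cons, List.take_succ_cons, List.cons_eq_cons, List.getElem_map,
    Nat.add_sub_cancel]

theorem guardB_iff (document toks : List String) (i : Nat) :
    ((i : Int) < (document.length : Int) - (toks.length : Int) + 1 ↔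
      i + toks.length ≤ document.length) := by
  omega

-- the occurrence index looked up at any key is the filtered enumerate positions
theorem altOcc_getD (low : List String) (k : String) :
    (altOcc low).getD k [] =
      ((PySem.List.enumerate low).filter (fun p => p.2 == k)).map (fun p => p.1) := by
  have h1 : (PySem.List.enumerate low).foldl
      (fun occ iw => occ.modify iw.2 [] (fun l => l ++ [iw.1])) PySem.Dict.empty
      = ((PySem.List.enumerate low).map Prod.swap).foldl
        (fun d p => d.modify p.1 [] (fun l => l ++ [p.2])) PySem.Dict.empty := by
    rw [List.foldl_map]
    rfl
  rw [altOcc, h1, PySem.Dict.getD_foldl_modify_append, PySem.Dict.getD_empty, List.nil_append,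
    List.filter_map, List.map_map]
  rfl

theorem scan1_none (document toks : List String) (head : String) (rest : List String)
    (hcons : toks = head :: rest) (ws : List String) (j : Nat)
    (hws : ws = (document.map PySem.Str.lower).drop j)
    (h : ∀ j', j ≤ j' → j' + toks.length ≤ document.length → ¬ dExactAt document toks j' = true) :
    altScan1 (document.map PySem.Str.lower) rest toks.length
      ((document.length : Int) - (toks.length : Int) + 1)
      (((PySem.List.enumerate ws (j : Int)).filter (fun p => p.2 == head)).map (fun p => p.1)) = none := by
  induction ws generalizing j with
  | nil => simp [PySem.List.enumerate_nil, altScan1]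
  | cons w ws' ih =>
    have hjlt : j < (document.map PySem.Str.lower).length := by
      by_contra hge
      rw [List.drop_eq_nil_of_le (by omega)] at hws
      exact List.cons_ne_nil _ _ hws
    rw [List.drop_eq_getElem_cons hjlt] at hws
    obtain ⟨hw, hws'⟩ := List.cons.inj hws
    rw [PySem.List.enumerate_cons]
    have hstep : ((j : Int) + 1) = (((j + 1 : Nat)) : Int) := by push_cast; ring
    by_cases hwh : ((w == head) = true)
    · rw [List.filter_cons_of_pos (by simpa using hwh), List.map_cons]
      rw [altScan1]
      have htest : ¬ ((j : Int) < (document.length : Int) - (toks.length : Int) + 1 ∧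
          PySem.List.slice (document.map PySem.Str.lower) (some ((j : Int) + 1))
            (some ((j : Int) + (toks.length : Int))) = rest) := by
        rintro ⟨hg, hsl⟩
        have hjm : j + toks.length ≤ document.length := (guardB_iff document toks j).mp hg
        have hhead : PySem.List.pyGetD (document.map PySem.Str.lower) ((j : Nat) : Int) "" = head := by
          rw [getD_low _ j hjlt, ← hw]
          exact eq_of_beq hwh
        exact h j le_rfl hjm ((testB1_iff document toks head rest hcons j hjm).mp ⟨hhead, hsl⟩)
      rw [if_neg htest, hstep]
      exact ih (j + 1) hws' (fun j' hj' hjm => h j' (by omega) hjm)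
    · rw [List.filter_cons_of_neg (by simpa using hwh), hstep]
      exact ih (j + 1) hws' (fun j' hj' hjm => h j' (by omega) hjm)

theorem scan1_some (document toks : List String) (head : String) (rest : List String)
    (hcons : toks = head :: rest) (ws : List String) (j jm : Nat)
    (hws : ws = (document.map PySem.Str.lower).drop j)
    (hj : j ≤ jm) (hjm : jm + toks.length ≤ document.length)
    (hE : dExactAt document toks jm = true)
    (hmin : ∀ k, j ≤ k → k < jm → ¬ dExactAt document toks k = true) :
    altScan1 (document.map PySem.Str.lower) rest toks.length
      ((document.length : Int) - (toks.length : Int) + 1)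
      (((PySem.List.enumerate ws (j : Int)).filter (fun p => p.2 == head)).map (fun p => p.1)) =
      some ((jm : Int), (jm : Int) + (toks.length : Int)) := by
  have hm : 1 ≤ toks.length := by rw [hcons]; simp
  obtain ⟨hEhead, hEslice⟩ := (testB1_iff document toks head rest hcons jm hjm).mpr hE
  induction ws generalizing j with
  | nil =>
    exfalso
    have : (document.map PySem.Str.lower).length ≤ j := by
      by_contra hlt
      rw [List.drop_eq_getElem_cons (by omega)] at hws
      exact List.cons_ne_nil _ _ hws.symm
    simp at this
    omega
  | cons w ws' ih =>
    have hjlt : j < (document.map PySem.Str.lower).length := by simp; omega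
    rw [List.drop_eq_getElem_cons hjlt] at hws
    obtain ⟨hw, hws'⟩ := List.cons.inj hws
    rw [PySem.List.enumerate_cons]
    have hstep : ((j : Int) + 1) = (((j + 1 : Nat)) : Int) := by push_cast; ring
    by_cases hwh : ((w == head) = true)
    · rw [List.filter_cons_of_pos (by simpa using hwh), List.map_cons]
      rw [altScan1]
      by_cases htest : ((j : Int) < (document.length : Int) - (toks.length : Int) + 1 ∧
          PySem.List.slice (document.map PySem.Str.lower) (some ((j : Int) + 1))
            (some ((j : Int) + (toks.length : Int))) = rest)
      · obtain ⟨hg, hsl⟩ := htest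
        have hjm' : j + toks.length ≤ document.length := (guardB_iff document toks j).mp hg
        have hhead : PySem.List.pyGetD (document.map PySem.Str.lower) ((j : Nat) : Int) "" = head := by
          rw [getD_low _ j hjlt, ← hw]
          exact eq_of_beq hwh
        have hEj : dExactAt document toks j = true :=
          (testB1_iff document toks head rest hcons j hjm').mp ⟨hhead, hsl⟩
        have hje : j = jm := by
          by_contra hne
          exact hmin j le_rfl (by omega) hEj
        rw [if_pos ⟨hg, hsl⟩, hje]
      · rw [if_neg htest, hstep]
        have hjne : j ≠ jm := by
          intro hje
          subst hje
          exact htest ⟨(guardB_iff document toks j).mpr hjm, hEslice⟩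
        exact ih (j + 1) hws' (by omega) (fun k hk hkj => hmin k (by omega) hkj)
    · rw [List.filter_cons_of_neg (by simpa using hwh), hstep]
      have hjne : j ≠ jm := by
        intro hje
        subst hje
        apply hwh
        have : w = head := by
          rw [hw, ← getD_low _ j hjlt]
          exact hEhead
        simp [this]
      exact ih (j + 1) hws' (by omega) (fun k hk hkj => hmin k (by omega) hkj)

theorem test2_eq (document toks : List String) (i : Nat) :
    ((toks.zip (PySem.List.slice (document.map PySem.Str.lower) (some ((i : Nat) : Int))
        (some (((i : Nat) : Int) + (toks.length : Int))))).all
      (fun tw => PySem.Str.isIn tw.1 tw.2)) = dSubAt document toks i := by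
  have h2 : ((i : Nat) : Int) + (toks.length : Int) = ((i + toks.length : Nat) : Int) := by
    push_cast; ring
  rw [h2, PySem.List.slice_natCast, Nat.add_sub_cancel_left, dSubAt]

theorem scanB2_none (document toks : List String) (fuel i : Nat)
    (h : ∀ j, i ≤ j → j + toks.length ≤ document.length → ¬ dSubAt document toks j = true) :
    altScan2 (document.map PySem.Str.lower) toks toks.length
      ((document.length : Int) - (toks.length : Int) + 1) fuel i = none := by
  induction fuel generalizing i with
  | zero => rfl
  | succ fuel ih =>
    rw [altScan2]
    split_ifs with h1 h2
    · rw [test2_eq] at h2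
      exact absurd h2 (h i le_rfl ((guardB_iff document toks i).mp h1))
    · exact ih (i + 1) (fun j hj hjm => h j (by omega) hjm)
    · rfl

theorem scanB2_some (document toks : List String) (fuel i j : Nat)
    (hfuel : document.length + 1 ≤ fuel + i) (hij : i ≤ j)
    (hj : j + toks.length ≤ document.length) (hS : dSubAt document toks j = true)
    (hmin : ∀ k, i ≤ k → k < j → ¬ dSubAt document toks k = true) :
    altScan2 (document.map PySem.Str.lower) toks toks.length
      ((document.length : Int) - (toks.length : Int) + 1) fuel i =
      some ((j : Int), (j : Int) + (toks.length : Int)) := by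
  induction fuel generalizing i with
  | zero => omega
  | succ fuel ih =>
    rw [altScan2]
    rw [if_pos ((guardB_iff document toks i).mpr (by omega))]
    rcases Nat.eq_or_lt_of_le hij with rfl | hlt
    · rw [if_pos (by rw [test2_eq]; exact hS)]
    · rw [if_neg (by rw [test2_eq]; exact hmin i le_rfl hlt)]
      exact ih (i + 1) (by omega) (by omega) (fun k hk hkj => hmin k (by omega) hkj)

theorem find_answer_csv_eq_match (offsets : List Int) (document tokens : List String) :
    find_answer_csv offsets document tokens =
      match pvLoop1 document (dStrip tokens) (document.length + 1) 0 with
      | some r => some r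
      | none => pvLoop2 document (dStrip tokens) (document.length + 1) 0 := by
  rw [find_answer_csv, stripA_eq]

theorem find_answer_csv_alt_eq_match (offsets : List Int) (document tokens : List String)
    (head : String) (rest : List String) (hcons : dStrip tokens = head :: rest) :
    find_answer_csv_alt offsets document tokens =
      match altScan1 (document.map PySem.Str.lower) rest (dStrip tokens).length
          ((document.length : Int) - ((dStrip tokens).length : Int) + 1)
          (((PySem.List.enumerate (document.map PySem.Str.lower)).filter
            (fun p => p.2 == head)).map (fun p => p.1)) with
      | some r => some r
      | none =>
        altScan2 (document.map PySem.Str.lower) (dStrip tokens) (dStrip tokens).length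
          ((document.length : Int) - ((dStrip tokens).length : Int) + 1) (document.length + 1) 0 := by
  rw [find_answer_csv_alt, stripB_eq, altMain]
  have h0 : PySem.List.pyGetD (dStrip tokens) 0 "" = head := by
    rw [hcons]; simp [PySem.List.pyGetD, PySem.List.pyIdx?]
  have h1 : PySem.List.slice (dStrip tokens) (some 1) none = rest := by
    rw [PySem.List.slice_from_one, hcons]; rfl
  rw [h0, h1, altOcc_getD]

theorem zip_take_len {α β : Type} (t : List α) (s : List β) :
    t.zip (s.take t.length) = t.zip s := by
  induction t generalizing s with
  | nil => simp
  | cons x t ih =>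
    cases s with
    | nil => simp
    | cons y s => simp [ih]

theorem prefix_eq_exact (document t : List String) (j : Nat) :
    t.isPrefixOf ((document.map PySem.Str.lower).drop j) = dExactAt document t j := by
  by_cases h : t <+: (document.map PySem.Str.lower).drop j
  · rw [List.isPrefixOf_iff_prefix.mpr h, dExactAt]
    exact (beq_iff_eq.mpr (List.prefix_iff_eq_take.mp h).symm).symm
  · have hb : t.isPrefixOf ((document.map PySem.Str.lower).drop j) = false :=
      Bool.eq_false_iff.mpr (fun hc => h (List.isPrefixOf_iff_prefix.mp hc))
    rw [hb, dExactAt]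
    symm
    rw [Bool.eq_false_iff]
    intro hc
    exact h (List.prefix_iff_eq_take.mpr (beq_iff_eq.mp hc).symm)

theorem dSubB_eq_all (t s : List String) :
    dSubB t s = (t.zip s).all fun tw => PySem.Str.isIn tw.1 tw.2 := by
  induction t generalizing s with
  | nil => simp [dSubB]
  | cons tok t ih =>
    cases s with
    | nil => simp [dSubB]
    | cons w s => simp [dSubB, ih]

theorem subB_eq (document t : List String) (j : Nat) :
    dSubB t ((document.map PySem.Str.lower).drop j) = dSubAt document t j := by
  rw [dSubB_eq_all, dSubAt, ← zip_take_len t ((document.map PySem.Str.lower).drop j)]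

theorem all_take_tails {α : Type} (l : List α) (p : List α → Bool) (K : Nat)
    (hK : K ≤ l.length + 1) :
    ((l.tails.take K).all p = true) ↔ (∀ j, j < K → p (l.drop j) = true) := by
  rw [List.all_eq_true]
  constructor
  · intro h j hj
    have hmem : l.drop j ∈ l.tails.take K := by
      have hg : (l.tails.take K)[j]'(by simp [List.length_take, List.length_tails]; omega) =
          l.drop j := by
        rw [List.getElem_take, List.getElem_tails]
      rw [← hg]
      exact List.getElem_mem _
    exact h _ hmem
  · intro h x hx
    obtain ⟨i, hi, hix⟩ := List.getElem_of_mem hx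
    have hiK : i < K := by
      simp [List.length_take, List.length_tails] at hi; omega
    have hxe : x = l.drop i := by
      rw [← hix, List.getElem_take, List.getElem_tails]
    rw [hxe]
    exact h i hiK

theorem noExactBefore_iff (document t : List String) (K : Nat)
    (hK : K ≤ document.length + 1) :
    (dNoExactBefore t (document.map PySem.Str.lower) K = true ↔
      ∀ j, j < K → ¬ dExactAt document t j = true) := by
  rw [dNoExactBefore, all_take_tails _ _ K (by simpa using hK)]
  constructor
  · intro h j hj
    have h2 := h j hj
    simp only [Bool.not_eq_eq_eq_not, Bool.not_true, prefix_eq_exact] at h2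
    simp [h2]
  · intro h j hj
    have h2 := h j hj
    simp only [Bool.not_eq_eq_eq_not, Bool.not_true, prefix_eq_exact]
    simpa using h2

theorem noSubBefore_iff (document t : List String) (K : Nat)
    (hK : K ≤ document.length + 1) :
    (dNoSubBefore t (document.map PySem.Str.lower) K = true ↔
      ∀ j, j < K → ¬ dSubAt document t j = true) := by
  rw [dNoSubBefore, all_take_tails _ _ K (by simpa using hK)]
  constructor
  · intro h j hj
    have h2 := h j hj
    simp only [Bool.not_eq_eq_eq_not, Bool.not_true, subB_eq] at h2
    simp [h2]
  · intro h j hj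
    have h2 := h j hj
    simp only [Bool.not_eq_eq_eq_not, Bool.not_true, subB_eq]
    simpa using h2

theorem build_D1 (offsets : List Int) (document tokens : List String)
    (hmn : (dStrip tokens).length ≤ document.length)
    (h1 : dExactAt document (dStrip tokens) (document.length - (dStrip tokens).length) = true)
    (h2 : ∀ j, j < document.length - (dStrip tokens).length →
      ¬ dExactAt document (dStrip tokens) j = true) :
    D_find_answer_csv offsets document tokens := by
  unfold D_find_answer_csv
  refine ⟨hmn, Or.inl ⟨?_, ?_⟩⟩
  · rw [prefix_eq_exact]; exact h1
  · exact (noExactBefore_iff document (dStrip tokens) _ (by omega)).mpr h2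

theorem build_D2 (offsets : List Int) (document tokens : List String)
    (hmn : (dStrip tokens).length ≤ document.length)
    (h0 : ∀ j, j ≤ document.length - (dStrip tokens).length →
      ¬ dExactAt document (dStrip tokens) j = true)
    (h1 : dSubAt document (dStrip tokens) (document.length - (dStrip tokens).length) = true)
    (h2 : ∀ j, j < document.length - (dStrip tokens).length →
      ¬ dSubAt document (dStrip tokens) j = true) :
    D_find_answer_csv offsets document tokens := by
  unfold D_find_answer_csv
  refine ⟨hmn, Or.inr ⟨?_, ?_, ?_⟩⟩
  · exact (noExactBefore_iff document (dStrip tokens) _ (by omega)).mpr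
      (fun j hj => h0 j (by omega))
  · rw [subB_eq]; exact h1
  · exact (noSubBefore_iff document (dStrip tokens) _ (by omega)).mpr h2

theorem D_elim (offsets : List Int) (document tokens : List String)
    (hD : D_find_answer_csv offsets document tokens) :
    (dStrip tokens).length ≤ document.length ∧
      ((dExactAt document (dStrip tokens) (document.length - (dStrip tokens).length) = true ∧
          ∀ j, j < document.length - (dStrip tokens).length →
            ¬ dExactAt document (dStrip tokens) j = true) ∨
       ((∀ j, j ≤ document.length - (dStrip tokens).length →
            ¬ dExactAt document (dStrip tokens) j = true) ∧
          dSubAt document (dStrip tokens) (document.length - (dStrip tokens).length) = true ∧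
          ∀ j, j < document.length - (dStrip tokens).length →
            ¬ dSubAt document (dStrip tokens) j = true)) := by
  obtain ⟨hmn, hc⟩ := hD
  refine ⟨hmn, ?_⟩
  rcases hc with ⟨h1, h2⟩ | ⟨h0, h1, h2⟩
  · exact Or.inl ⟨by rw [← prefix_eq_exact]; exact h1,
      (noExactBefore_iff document _ _ (by omega)).mp h2⟩
  · exact Or.inr ⟨fun j hj => (noExactBefore_iff document _ _ (by omega)).mp h0 j (by omega),
      by rw [← subB_eq]; exact h1,
      (noSubBefore_iff document _ _ (by omega)).mp h2⟩

-- scan1 lemmas specialised to the whole document (start index 0)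
theorem scan1_none_zero (document toks : List String) (head : String) (rest : List String)
    (hcons : toks = head :: rest)
    (h : ∀ j', j' + toks.length ≤ document.length → ¬ dExactAt document toks j' = true) :
    altScan1 (document.map PySem.Str.lower) rest toks.length
      ((document.length : Int) - (toks.length : Int) + 1)
      (((PySem.List.enumerate (document.map PySem.Str.lower)).filter
        (fun p => p.2 == head)).map (fun p => p.1)) = none := by
  have := scan1_none document toks head rest hcons (document.map PySem.Str.lower) 0
    (List.drop_zero).symm (fun j' _ hjm => h j' hjm)
  simpa using this

theorem scan1_some_zero (document toks : List String) (head : String) (rest : List String)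
    (hcons : toks = head :: rest) (jm : Nat)
    (hjm : jm + toks.length ≤ document.length) (hE : dExactAt document toks jm = true)
    (hmin : ∀ k, k < jm → ¬ dExactAt document toks k = true) :
    altScan1 (document.map PySem.Str.lower) rest toks.length
      ((document.length : Int) - (toks.length : Int) + 1)
      (((PySem.List.enumerate (document.map PySem.Str.lower)).filter
        (fun p => p.2 == head)).map (fun p => p.1)) =
      some ((jm : Int), (jm : Int) + (toks.length : Int)) := by
  have := scan1_some document toks head rest hcons (document.map PySem.Str.lower) 0 jm
    (List.drop_zero).symm (Nat.zero_le _) hjm hE (fun k _ hk => hmin k hk)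
  simpa using this

-- ===== VERDICT (by name: the statement is the Claim_ definition above) =====
theorem find_answer_csv_spec : Claim_unchanged_find_answer_csv := by
  unfold Claim_unchanged_find_answer_csv
  intro offsets document tokens hdom hpre
  unfold Spec_find_answer_csv
  intro hnd
  obtain ⟨head, rest, hcons⟩ : ∃ h r, dStrip tokens = h :: r := by
    rcases hh : dStrip tokens with _ | ⟨h, r⟩
    · exact absurd hh (dStrip_ne_nil tokens hpre)
    · exact ⟨h, r, rfl⟩
  rw [find_answer_csv_eq_match, find_answer_csv_alt_eq_match offsets document tokens head rest hcons]
  by_cases hmn : (dStrip tokens).length ≤ document.length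
  · by_cases hEx : ∃ j, j ≤ document.length - (dStrip tokens).length ∧
        dExactAt document (dStrip tokens) j = true
    · obtain ⟨hj0K, hj0E⟩ := Nat.find_spec hEx
      have hj0min : ∀ k, k < Nat.find hEx → ¬ dExactAt document (dStrip tokens) k = true := by
        intro k hk hEk
        rcases Nat.lt_or_ge (document.length - (dStrip tokens).length) k with hc | hc
        · omega
        · exact Nat.find_min hEx hk ⟨by omega, hEk⟩
      have hj0K' : Nat.find hEx < document.length - (dStrip tokens).length := by
        rcases Nat.eq_or_lt_of_le hj0K with heq | hlt
        · exact absurd (build_D1 offsets document tokens hmn (heq ▸ hj0E)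
            (fun j hj => hj0min j (by omega))) hnd
        · exact hlt
      rw [loopA1_some document (dStrip tokens) (document.length + 1) 0 (Nat.find hEx)
          (by omega) (by omega) (by omega) hj0E (fun k _ hk => hj0min k hk),
        scan1_some_zero document (dStrip tokens) head rest hcons (Nat.find hEx)
          (by omega) hj0E hj0min]
    · push_neg at hEx
      have hnoE : ∀ j, j ≤ document.length - (dStrip tokens).length →
          ¬ dExactAt document (dStrip tokens) j = true := fun j hj => hEx j hj
      rw [loopA1_none document (dStrip tokens) (document.length + 1) 0
          (fun j _ hjm => hnoE j (by omega)),
        scan1_none_zero document (dStrip tokens) head rest hcons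
          (fun j hjm => hnoE j (by omega))]
      by_cases hSx : ∃ j, j ≤ document.length - (dStrip tokens).length ∧
          dSubAt document (dStrip tokens) j = true
      · obtain ⟨hj1K, hj1S⟩ := Nat.find_spec hSx
        have hj1min : ∀ k, k < Nat.find hSx → ¬ dSubAt document (dStrip tokens) k = true := by
          intro k hk hSk
          rcases Nat.lt_or_ge (document.length - (dStrip tokens).length) k with hc | hc
          · omega
          · exact Nat.find_min hSx hk ⟨by omega, hSk⟩
        have hj1K' : Nat.find hSx < document.length - (dStrip tokens).length := by
          rcases Nat.eq_or_lt_of_le hj1K with heq | hlt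
          · exact absurd (build_D2 offsets document tokens hmn hnoE (heq ▸ hj1S)
              (fun j hj => hj1min j (by omega))) hnd
          · exact hlt
        rw [loopA2_some document (dStrip tokens) (document.length + 1) 0 (Nat.find hSx)
            (by omega) (by omega) (by omega) hj1S (fun k _ hk => hj1min k hk),
          scanB2_some document (dStrip tokens) (document.length + 1) 0 (Nat.find hSx)
            (by omega) (by omega) (by omega) hj1S (fun k _ hk => hj1min k hk)]
      · push_neg at hSx
        rw [loopA2_none document (dStrip tokens) (document.length + 1) 0
            (fun j _ hjm => hSx j (by omega)),
          scanB2_none document (dStrip tokens) (document.length + 1) 0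
            (fun j _ hjm => hSx j (by omega))]
  · rw [loopA1_none document (dStrip tokens) (document.length + 1) 0
        (fun j _ hjm => absurd hjm (by omega)),
      scan1_none_zero document (dStrip tokens) head rest hcons
        (fun j hjm => absurd hjm (by omega)),
      loopA2_none document (dStrip tokens) (document.length + 1) 0
        (fun j _ hjm => absurd hjm (by omega)),
      scanB2_none document (dStrip tokens) (document.length + 1) 0
        (fun j hj hjm => absurd hjm (by omega))]

theorem find_answer_csv_changed : Claim_changed_find_answer_csv := by
  unfold Claim_changed_find_answer_csv; decide

theorem find_answer_csv_tight : Claim_exact_find_answer_csv := by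
  unfold Claim_exact_find_answer_csv
  intro offsets document tokens hdom hpre hD
  obtain ⟨head, rest, hcons⟩ : ∃ h r, dStrip tokens = h :: r := by
    rcases hh : dStrip tokens with _ | ⟨h, r⟩
    · exact absurd hh (dStrip_ne_nil tokens hpre)
    · exact ⟨h, r, rfl⟩
  obtain ⟨hmn, hcase⟩ := D_elim offsets document tokens hD
  rw [find_answer_csv_eq_match, find_answer_csv_alt_eq_match offsets document tokens head rest hcons]
  rcases hcase with ⟨hEK, hnoE⟩ | ⟨hnoE, hSK, hnoS⟩
  · -- exact match only at the last window: A's pass 1 misses it, B returns it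
    rw [loopA1_none document (dStrip tokens) (document.length + 1) 0
        (fun j _ hjm => hnoE j (by omega)),
      scan1_some_zero document (dStrip tokens) head rest hcons
        (document.length - (dStrip tokens).length) (by omega) hEK
        (fun k hk => hnoE k hk)]
    rcases hA2 : pvLoop2 document (dStrip tokens) (document.length + 1) 0 with _ | r
    · simp
    · obtain ⟨j, _, hjm, hr⟩ := loopA2_shape document (dStrip tokens) (document.length + 1) 0 r hA2
      simp only [hr]
      intro hc
      have : (j : Int) = ((document.length - (dStrip tokens).length : Nat) : Int) :=
        congrArg Prod.fst (Option.some.inj hc)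
      omega
  · -- substring match only at the last window: A returns none, B returns it
    rw [loopA1_none document (dStrip tokens) (document.length + 1) 0
        (fun j _ hjm => hnoE j (by omega)),
      scan1_none_zero document (dStrip tokens) head rest hcons
        (fun j hjm => hnoE j (by omega)),
      loopA2_none document (dStrip tokens) (document.length + 1) 0
        (fun j _ hjm => hnoS j (by omega)),
      scanB2_some document (dStrip tokens) (document.length + 1) 0
        (document.length - (dStrip tokens).length) (by omega) (by omega) (by omega)
        hSK (fun k _ hk => hnoS k hk)]
    simp
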